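-- pv_equiv track=rewrite | github.com/Maxelee/hydro_replace | notebooks/find_missing_lensing.py | format_array_string
-- ===== SOURCE A (Python) =====
-- def format_array_string(indices):
--     """Format indices into SLURM array specification."""
--     if not indices:
--         return ""
--
--     # Group consecutive indices into ranges
--     ranges = []
--     start = indices[0]
--     end = indices[0]
--
--     for idx in indices[1:]:
--         if idx == end + 1:
--             end = idx
--         else:
--             if start == end:
--                 ranges.append(f"{start}")
--             else:
--                 ranges.append(f"{start}-{end}")
--             start = idx
--             end = idx
--
--     # Add last range
--     if start == end:
--         ranges.append(f"{start}")
--     else: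
--         ranges.append(f"{start}-{end}")
--
--     return ",".join(ranges)
-- ===== SOURCE B (Python) =====
-- from itertools import groupby
--
--
-- def format_array_string(indices):
--     """Format indices into SLURM array specification."""
--     parts = []
--     for _, group in groupby(enumerate(indices), key=lambda p: p[1] - p[0]):
--         run = [v for _, v in group]
--         parts.append(f"{run[0]}" if len(run) == 1 else f"{run[0]}-{run[-1]}")
--     return ",".join(parts)
-- ===== Notes on version B (the rewrite author's own statement) =====
-- stated objective: idiomatic
-- what changed: Replaces the hand-written start/end state machine with itertools.groupby over enumerate keyed by value-minus-index, so each maximal consecutive run is one group formatted directly.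
import Mathlib
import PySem

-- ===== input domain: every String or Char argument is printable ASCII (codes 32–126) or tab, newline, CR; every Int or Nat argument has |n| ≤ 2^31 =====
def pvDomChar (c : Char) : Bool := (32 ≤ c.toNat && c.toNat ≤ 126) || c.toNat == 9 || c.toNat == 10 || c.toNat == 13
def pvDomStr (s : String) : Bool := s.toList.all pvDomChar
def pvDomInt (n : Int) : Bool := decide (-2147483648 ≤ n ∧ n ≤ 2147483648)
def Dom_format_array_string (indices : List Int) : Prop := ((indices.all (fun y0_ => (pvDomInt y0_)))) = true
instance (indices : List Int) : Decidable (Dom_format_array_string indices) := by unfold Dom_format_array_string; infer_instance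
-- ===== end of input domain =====

-- B: replaces A's start/end state machine by groupby-style grouping of maximal
-- consecutive runs (idiomatic itertools.groupby in Python); same value everywhere, proved equal.

-- ===== PORT A =====
-- f"{start}" / f"{start}-{end}" branch used twice in A
def fmtRangeA (s e : Int) : String :=
  if s == e then PySem.Int.toStr s else PySem.Int.toStr s ++ "-" ++ PySem.Int.toStr e

def format_array_string (indices : List Int) : String :=
  match indices with
  | [] => ""
  | first :: rest =>
    -- for idx in indices[1:]: … , state (ranges, start, end)
    let st := rest.foldl
      (fun (st : List String × Int × Int) idx =>
        let (ranges, start, «end») := st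
        if idx == «end» + 1 then (ranges, start, idx)
        else (ranges ++ [fmtRangeA start «end»], idx, idx))
      ([], first, first)
    PySem.Str.join "," (st.1 ++ [fmtRangeA st.2.1 st.2.2])

-- ===== PORT B =====
-- groupby(enumerate(indices), key = v - i): consecutive elements share a group
-- iff the next value is previous + 1; each group kept as (run[0], run[-1]).
def runsB : List Int → List (Int × Int)
  | [] => []
  | x :: xs =>
    match runsB xs with
    | [] => [(x, x)]
    | (a, b) :: rs => if a == x + 1 then (x, b) :: rs else (x, x) :: (a, b) :: rs

def fmtRunB (r : Int × Int) : String :=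
  if r.1 == r.2 then PySem.Int.toStr r.1
  else PySem.Int.toStr r.1 ++ "-" ++ PySem.Int.toStr r.2

def format_array_string_alt (indices : List Int) : String :=
  PySem.Str.join "," ((runsB indices).map fmtRunB)

-- ===== PRECONDITION & SPEC =====
def Spec_format_array_string (indices : List Int) (out : String) : Prop := out = format_array_string_alt indices
instance (indices : List Int) (out : String) : Decidable (Spec_format_array_string indices out) := by unfold Spec_format_array_string; infer_instance

-- ===== CLAIM (what is proved, stated in full; the proofs are below) =====
def Claim_equal_format_array_string : Prop := ∀ (indices : List Int), Dom_format_array_string indices → Spec_format_array_string indices (format_array_string indices)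

-- ===== LEMMAS AND PROOFS =====

-- A's remaining output given pending run (s, e), written as front recursion
def auxA (s e : Int) : List Int → List String
  | [] => [fmtRangeA s e]
  | idx :: rest => if idx == e + 1 then auxA s idx rest
                   else fmtRangeA s e :: auxA idx idx rest

-- merge a pending run (s, e) in front of an already computed run list
def consRun (s e : Int) : List (Int × Int) → List (Int × Int)
  | [] => [(s, e)]
  | (a, b) :: rs => if a == e + 1 then (s, b) :: rs else (s, e) :: (a, b) :: rs

theorem foldl_eq_auxA (l : List Int) : ∀ (acc : List String) (s e : Int),
    (let st := l.foldl
      (fun (st : List String × Int × Int) idx =>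
        let (ranges, start, en) := st
        if idx == en + 1 then (ranges, start, idx)
        else (ranges ++ [fmtRangeA start en], idx, idx))
      (acc, s, e)
     st.1 ++ [fmtRangeA st.2.1 st.2.2]) = acc ++ auxA s e l := by
  induction l with
  | nil => intro acc s e; simp [auxA]
  | cons idx rest ih =>
    intro acc s e
    by_cases h : idx = e + 1
    · simpa [auxA, h] using ih acc s (e + 1)
    · simpa [auxA, h, List.append_assoc] using ih (acc ++ [fmtRangeA s e]) idx idx

theorem auxA_eq_consRun (l : List Int) : ∀ (s e : Int),
    auxA s e l = (consRun s e (runsB l)).map fmtRunB := by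
  induction l with
  | nil => intro s e; simp [auxA, consRun, runsB, fmtRunB, fmtRangeA]
  | cons idx rest ih =>
    intro s e
    simp only [auxA, runsB]
    rcases hr : runsB rest with _ | ⟨⟨a, b⟩, rs⟩
    · by_cases h : idx = e + 1
      · subst h; simp [ih, hr, consRun, fmtRunB]
      · simp [h, ih, hr, consRun, fmtRunB, fmtRangeA]
    · by_cases h : idx = e + 1
      · subst h
        by_cases h2 : a = e + 1 + 1 <;> simp [h2, ih, hr, consRun, fmtRunB]
      · by_cases h2 : a = idx + 1 <;> simp [h, h2, ih, hr, consRun, fmtRunB, fmtRangeA]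

theorem runsB_cons_eq (x : Int) (xs : List Int) :
    runsB (x :: xs) = consRun x x (runsB xs) := by
  simp only [runsB]
  rcases runsB xs with _ | ⟨⟨a, b⟩, rs⟩ <;> simp [consRun]

-- ===== VERDICT (by name: the statement is the Claim_ definition above) =====
theorem format_array_string_spec : Claim_equal_format_array_string := by
  intro indices _
  unfold Spec_format_array_string format_array_string format_array_string_alt
  match indices with
  | [] => simp [runsB, PySem.Str.join]
  | first :: rest =>
    simp only
    rw [foldl_eq_auxA rest [] first first, List.nil_append,
      auxA_eq_consRun, runsB_cons_eq]
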